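-- pv_equiv track=rewrite | github.com/Muhtasham/CodeClash | codeclash/tournaments/utils/git_utils.py | filter_git_diff
-- ===== SOURCE A (Python) =====
-- def filter_git_diff(text: str) -> str:
--     """Return a git diff with any file sections mentioning binary content removed."""
--     lines = text.splitlines(keepends=True)
--     out: list[str] = []
--     block: list[str] = []
--     in_block = False
--     prelude_copied = False
--
--     def is_binary_block(bl: list[str]) -> bool:
--         for ln in bl:
--             s = ln.strip()
--             if ln.startswith("Binary files "):
--                 return True
--             if s == "GIT binary patch":
--                 return True
--         return False
--
--     for ln in lines:
--         if ln.startswith("diff --git "):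
--             if in_block:
--                 if not is_binary_block(block):
--                     out.extend(block)
--                 block = []
--             else:
--                 if not prelude_copied:
--                     prelude_copied = True
--             in_block = True
--         if in_block:
--             block.append(ln)
--         else:
--             out.append(ln)
--
--     if in_block and block:
--         if not is_binary_block(block):
--             out.extend(block)
--
--     return "".join(out)
-- ===== SOURCE B (Python) =====
-- def _span_non_start(ls):
--     """Split ls into (prefix of lines not starting a diff section, the rest)."""
--     for i, ln in enumerate(ls):
--         if ln.startswith("diff --git "):
--             return ls[:i], ls[i:]
--     return ls, []
--
--
-- def _is_binary_block(bl):
--     return any(ln.startswith("Binary files ") or ln.strip() == "GIT binary patch"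
--                for ln in bl)
--
--
-- def filter_git_diff(text: str) -> str:
--     """Return a git diff with any file sections mentioning binary content removed."""
--     lines = text.splitlines(keepends=True)
--     # phase 1: group — prelude before the first 'diff --git ' line, then blocks
--     prelude, rest = _span_non_start(lines)
--     blocks = []
--     while rest:
--         head, tail = rest[0], rest[1:]
--         body, rest = _span_non_start(tail)
--         blocks.append([head] + body)
--     # phase 2: filter and join
--     kept = [b for b in blocks if not _is_binary_block(b)]
--     return "".join(prelude + [ln for b in kept for ln in b])
-- ===== Notes on version B (the rewrite author's own statement) =====
-- stated objective: simpler
-- what changed: A's single stateful per-line loop with out/block/in_block/prelude_copied state is replaced by a two-phase decomposition: split the lines into a prelude and 'diff --git '-delimited blocks, then filter out binary blocks and join.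
import Mathlib
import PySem

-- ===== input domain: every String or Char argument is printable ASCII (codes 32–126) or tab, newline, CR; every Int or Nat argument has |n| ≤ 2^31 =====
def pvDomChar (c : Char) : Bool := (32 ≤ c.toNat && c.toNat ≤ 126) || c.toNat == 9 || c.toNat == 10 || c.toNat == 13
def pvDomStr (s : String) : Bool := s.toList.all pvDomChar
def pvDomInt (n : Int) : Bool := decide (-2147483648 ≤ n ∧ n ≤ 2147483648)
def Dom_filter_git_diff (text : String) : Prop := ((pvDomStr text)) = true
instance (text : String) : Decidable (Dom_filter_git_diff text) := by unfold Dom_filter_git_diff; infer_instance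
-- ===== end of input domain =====

-- B replaces A's stateful one-pass loop by a two-phase group-then-filter decomposition (simpler; return value only, no mutation).

-- shared helpers: the Python builtins/tests both versions call verbatim
-- text.splitlines(keepends=True), exact on Dom (whose only line-break characters are '\n', '\r', '\r\n')
def gdSplitKeep : List Char → List Char → List (List Char)
  | acc, [] => if acc.isEmpty then [] else [acc.reverse]
  | acc, '\r' :: '\n' :: rest => (acc.reverse ++ ['\r', '\n']) :: gdSplitKeep [] rest
  | acc, '\r' :: rest => (acc.reverse ++ ['\r']) :: gdSplitKeep [] rest
  | acc, '\n' :: rest => (acc.reverse ++ ['\n']) :: gdSplitKeep [] rest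
  | acc, c :: rest => gdSplitKeep (c :: acc) rest

def gdStart (ln : List Char) : Bool := PySem.Chars.startswith ln "diff --git ".toList

-- is_binary_block (identical in A and B): early-returning for-loop / any over the same test
def gdIsBinaryBlock (bl : List (List Char)) : Bool :=
  bl.any (fun ln => PySem.Chars.startswith ln "Binary files ".toList
                    || (PySem.Chars.strip ln == "GIT binary patch".toList))

-- ===== PORT A =====
-- state: (out, block, in_block, prelude_copied)
def gdStepA (st : List (List Char) × List (List Char) × Bool × Bool) (ln : List Char) :
    List (List Char) × List (List Char) × Bool × Bool :=
  let s1 :=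
    if gdStart ln then
      if st.2.2.1 then
        ((if !gdIsBinaryBlock st.2.1 then st.1 ++ st.2.1 else st.1), ([] : List (List Char)), true, st.2.2.2)
      else
        (st.1, st.2.1, true, if !st.2.2.2 then true else st.2.2.2)
    else st
  if s1.2.2.1 then (s1.1, s1.2.1 ++ [ln], s1.2.2.1, s1.2.2.2)
  else (s1.1 ++ [ln], s1.2.1, s1.2.2.1, s1.2.2.2)

-- the trailing 'if in_block and block:' flush
def gdFinA (st : List (List Char) × List (List Char) × Bool × Bool) : List (List Char) :=
  if st.2.2.1 && !st.2.1.isEmpty then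
    (if !gdIsBinaryBlock st.2.1 then st.1 ++ st.2.1 else st.1)
  else st.1

def filter_git_diff (text : String) : String :=
  let lines := gdSplitKeep [] text.toList
  String.ofList (gdFinA (lines.foldl gdStepA ([], [], false, false))).flatten

-- ===== PORT B =====
-- _span_non_start: (lines before the first 'diff --git ' line, the rest)
def gdSpan (ls : List (List Char)) : List (List Char) × List (List Char) :=
  (ls.takeWhile (fun l => !gdStart l), ls.dropWhile (fun l => !gdStart l))

-- the while-loop grouping rest into blocks, each headed by a 'diff --git ' line
def gdBlocks : List (List Char) → List (List (List Char))
  | [] => []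
  | ln :: rest => (ln :: (gdSpan rest).1) :: gdBlocks (gdSpan rest).2
termination_by ls => ls.length
decreasing_by
  simp only [gdSpan, List.length_cons]
  exact Nat.lt_succ_of_le (List.length_dropWhile_le _ _)

def filter_git_diff_alt (text : String) : String :=
  let lines := gdSplitKeep [] text.toList
  let p := gdSpan lines
  let kept := (gdBlocks p.2).filter (fun b => !gdIsBinaryBlock b)
  String.ofList ((p.1 ++ kept.flatMap id).flatten)

-- ===== PRECONDITION & SPEC =====
def Spec_filter_git_diff (text : String) (out : String) : Prop := out = filter_git_diff_alt text
instance (text : String) (out : String) : Decidable (Spec_filter_git_diff text out) := by unfold Spec_filter_git_diff; infer_instance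

-- ===== CLAIM (what is proved, stated in full; the proofs are below) =====
def Claim_equal_filter_git_diff : Prop := ∀ (text : String), Dom_filter_git_diff text → Spec_filter_git_diff text (filter_git_diff text)

-- ===== LEMMAS AND PROOFS =====

def gdKeep (b : List (List Char)) : List (List Char) := if gdIsBinaryBlock b then [] else b

theorem gdFinA_true (out b : List (List Char)) (pc : Bool) :
    gdFinA (out, b, true, pc) = out ++ gdKeep b := by
  cases b <;> simp [gdFinA, gdKeep, gdIsBinaryBlock] <;> split <;> simp_all

theorem gd_prelude_phase (ls : List (List Char)) :
    ∀ (out block : List (List Char)) (pc : Bool), (∀ l ∈ ls, gdStart l = false) →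
    List.foldl gdStepA (out, block, false, pc) ls = (out ++ ls, block, false, pc) := by
  induction ls with
  | nil => intro out block pc _; simp
  | cons a t ih =>
      intro out block pc h
      have ha := h a (by simp)
      simp only [List.foldl_cons]
      have : gdStepA (out, block, false, pc) a = (out ++ [a], block, false, pc) := by
        simp [gdStepA, ha]
      rw [this, ih _ _ _ (fun l hl => h l (by simp [hl]))]
      simp

theorem gd_body_phase (ls : List (List Char)) :
    ∀ (out block : List (List Char)) (pc : Bool), (∀ l ∈ ls, gdStart l = false) →
    List.foldl gdStepA (out, block, true, pc) ls = (out, block ++ ls, true, pc) := by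
  induction ls with
  | nil => intro out block pc _; simp
  | cons a t ih =>
      intro out block pc h
      have ha := h a (by simp)
      simp only [List.foldl_cons]
      have : gdStepA (out, block, true, pc) a = (out, block ++ [a], true, pc) := by
        simp [gdStepA, ha]
      rw [this, ih _ _ _ (fun l hl => h l (by simp [hl]))]
      simp

theorem gd_step_start (out block : List (List Char)) (pc : Bool) (s : List Char)
    (hs : gdStart s = true) :
    gdStepA (out, block, true, pc) s = (out ++ gdKeep block, [s], true, pc) := by
  simp only [gdStepA, hs, if_pos, gdKeep]
  split <;> simp_all

theorem gd_head_dropWhile {p : List Char → Bool} {l : List (List Char)} {a : List Char}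
    {t : List (List Char)} (h : l.dropWhile p = a :: t) : p a = false := by
  induction l with
  | nil => simp at h
  | cons x xs ih =>
      by_cases hx : p x = true
      · rw [List.dropWhile_cons_of_pos hx] at h; exact ih h
      · rw [List.dropWhile_cons_of_neg hx] at h
        cases h; simpa using hx

theorem gd_mem_takeWhile {p : List Char → Bool} {l : List (List Char)} {a : List Char}
    (h : a ∈ l.takeWhile p) : p a = true := List.mem_takeWhile_imp h

theorem gd_core : ∀ (n : Nat) (rest : List (List Char)), rest.length ≤ n →
    ∀ (out block : List (List Char)) (pc : Bool),
    gdFinA (List.foldl gdStepA (out, block, true, pc) rest)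
      = out ++ gdKeep (block ++ rest.takeWhile (fun l => !gdStart l))
            ++ ((gdBlocks (rest.dropWhile (fun l => !gdStart l))).filter
                  (fun b => !gdIsBinaryBlock b)).flatMap id := by
  intro n
  induction n with
  | zero =>
      intro rest hr out block pc
      have : rest = [] := List.length_eq_zero_iff.mp (Nat.le_zero.mp hr)
      subst this
      simp [gdBlocks, gdFinA_true]
  | succ n ih =>
      intro rest hr out block pc
      have hsplit : rest = rest.takeWhile (fun l => !gdStart l)
          ++ rest.dropWhile (fun l => !gdStart l) := (List.takeWhile_append_dropWhile).symm
      set body := rest.takeWhile (fun l => !gdStart l) with hbody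
      set rest' := rest.dropWhile (fun l => !gdStart l) with hrest'
      have hbodyall : ∀ l ∈ body, gdStart l = false := by
        intro l hl
        have := gd_mem_takeWhile hl
        simpa using this
      rw [hsplit, List.foldl_append, gd_body_phase _ _ _ _ hbodyall]
      cases hc : rest' with
      | nil => simp [gdBlocks, gdFinA_true]
      | cons s r =>
          have hs : gdStart s = true := by
            have := gd_head_dropWhile (hrest' ▸ hc)
            simpa using this
          have hlen : r.length ≤ n := by
            have h1 : rest.length = body.length + rest'.length := by
              conv_lhs => rw [hsplit]
              simp
            rw [hc] at h1
            simp [List.length_cons] at h1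
            omega
          simp only [List.foldl_cons, gd_step_start _ _ _ _ hs]
          rw [ih r hlen]
          rw [gdBlocks]
          have hfilt : ∀ (x : List (List Char)) (xs : List (List (List Char))),
              ((x :: xs).filter (fun b => !gdIsBinaryBlock b)).flatMap id
                = gdKeep x ++ (xs.filter (fun b => !gdIsBinaryBlock b)).flatMap id := by
            intro x xs
            by_cases h : gdIsBinaryBlock x = true <;> simp [gdKeep, List.filter_cons, h]
          rw [hfilt]
          simp [gdSpan, gdKeep, List.append_assoc]

theorem gd_main (lines : List (List Char)) :
    gdFinA (lines.foldl gdStepA ([], [], false, false))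
      = (gdSpan lines).1
        ++ (((gdBlocks (gdSpan lines).2).filter (fun b => !gdIsBinaryBlock b)).flatMap id) := by
  have hsplit : lines = lines.takeWhile (fun l => !gdStart l)
      ++ lines.dropWhile (fun l => !gdStart l) := (List.takeWhile_append_dropWhile).symm
  have hpreall : ∀ l ∈ lines.takeWhile (fun l => !gdStart l), gdStart l = false := by
    intro l hl; simpa using gd_mem_takeWhile hl
  conv_lhs => rw [hsplit]
  rw [List.foldl_append, gd_prelude_phase _ _ _ _ hpreall]
  simp only [List.nil_append, gdSpan]
  cases hc : lines.dropWhile (fun l => !gdStart l) with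
  | nil => simp [gdBlocks, gdFinA]
  | cons s r =>
      have hs : gdStart s = true := by simpa using gd_head_dropWhile hc
      have hstep : gdStepA ((lines.takeWhile fun l => !gdStart l), [], false, false) s
          = ((lines.takeWhile fun l => !gdStart l), [s], true, true) := by
        simp [gdStepA, hs]
      simp only [List.foldl_cons, hstep]
      rw [gd_core r.length r (le_refl _)]
      rw [gdBlocks]
      have hfilt : ∀ (x : List (List Char)) (xs : List (List (List Char))),
          ((x :: xs).filter (fun b => !gdIsBinaryBlock b)).flatMap id
            = gdKeep x ++ (xs.filter (fun b => !gdIsBinaryBlock b)).flatMap id := by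
        intro x xs
        by_cases h : gdIsBinaryBlock x = true <;> simp [gdKeep, h]
      rw [hfilt]
      simp [gdSpan, gdKeep, List.append_assoc]

-- ===== VERDICT (by name: the statement is the Claim_ definition above) =====
theorem filter_git_diff_spec : Claim_equal_filter_git_diff := by
  intro text _
  unfold Spec_filter_git_diff filter_git_diff filter_git_diff_alt
  simp only []
  rw [gd_main]
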